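-- pv_equiv track=rewrite | github.com/bermed28/ciic4151-group-c-tuter | controller/user.py | getTimeBlocks
-- ===== SOURCE A (Python) =====
-- def getTimeBlocks(tids):
--     tids.sort()
--     timeBlocks, i, j = [], 0, 0
--
--     while j < len(tids):
--         if j == len(tids) - 1:
--             timeBlocks.append(tids[i:j+1])
--             break
--         else:
--             if tids[j + 1] - tids[j] > 1:
--                 timeBlocks.append(tids[i:j+1])
--                 j += 1
--                 i = j
--             else:
--                 j += 1
--
--     return timeBlocks
-- ===== SOURCE B (Python) =====
-- def getTimeBlocks(tids):
--     tids.sort()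
--     if not tids:
--         return []
--     blocks = [[tids[0]]]
--     for prev, cur in zip(tids, tids[1:]):
--         if cur - prev <= 1:
--             blocks[-1].append(cur)
--         else:
--             blocks.append([cur])
--     return blocks
-- ===== Notes on version B (the rewrite author's own statement) =====
-- stated objective: simpler
-- what changed: Replaces A's two-index while loop with slice extraction by a single pass over adjacent pairs (zip) that grows the last block or starts a new one; keeps the in-place sort.
import Mathlib
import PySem

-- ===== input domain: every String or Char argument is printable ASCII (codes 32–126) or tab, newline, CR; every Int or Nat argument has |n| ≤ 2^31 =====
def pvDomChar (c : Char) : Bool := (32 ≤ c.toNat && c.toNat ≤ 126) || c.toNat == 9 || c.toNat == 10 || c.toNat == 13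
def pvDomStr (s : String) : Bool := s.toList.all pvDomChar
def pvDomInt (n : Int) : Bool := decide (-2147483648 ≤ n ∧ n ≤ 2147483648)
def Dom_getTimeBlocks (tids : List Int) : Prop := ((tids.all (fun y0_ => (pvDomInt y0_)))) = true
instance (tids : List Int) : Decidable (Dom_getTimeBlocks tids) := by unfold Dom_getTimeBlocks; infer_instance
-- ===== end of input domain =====

-- B replaces A's two-index while loop + slices by one pass over adjacent pairs (simpler).
-- Note: A sorts its argument in place (B does too); the equivalence proved here is about the return value.

-- ===== PORT A =====
-- the while loop of A: state (i, j, timeBlocks); terminates since len - j decreases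
def getTimeBlocksGoA (ts : List Int) (i j : Nat) (acc : List (List Int)) : List (List Int) :=
  if _h : j < ts.length then
    if j = ts.length - 1 then
      acc ++ [PySem.List.slice ts (some (i : Int)) (some ((j : Int) + 1))]
    else
      -- tids[j+1], tids[j]: indices in range here, nonneg → getD matches Python indexing
      if (ts.getD (j+1) 0) - (ts.getD j 0) > 1 then
        getTimeBlocksGoA ts (j+1) (j+1) (acc ++ [PySem.List.slice ts (some (i : Int)) (some ((j : Int) + 1))])
      else
        getTimeBlocksGoA ts i (j+1) acc
  else acc
termination_by ts.length - j

def getTimeBlocks (tids : List Int) : List (List Int) :=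
  let ts := PySem.List.sorted tids (fun x => x) false
  getTimeBlocksGoA ts 0 0 []

-- ===== PORT B =====
def getTimeBlocksStep (blocks : List (List Int)) (p : Int × Int) : List (List Int) :=
  if p.2 - p.1 ≤ 1 then blocks.dropLast ++ [blocks.getLastD [] ++ [p.2]]
  else blocks ++ [[p.2]]

def getTimeBlocks_alt (tids : List Int) : List (List Int) :=
  let ts := PySem.List.sorted tids (fun x => x) false
  match ts with
  | [] => []
  | x :: rest => (ts.zip rest).foldl getTimeBlocksStep [[x]]

-- ===== PRECONDITION & SPEC =====
def Spec_getTimeBlocks (tids : List Int) (out : List (List Int)) : Prop := out = getTimeBlocks_alt tids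
instance (tids : List Int) (out : List (List Int)) : Decidable (Spec_getTimeBlocks tids out) := by unfold Spec_getTimeBlocks; infer_instance

-- ===== CLAIM (what is proved, stated in full; the proofs are below) =====
def Claim_equal_getTimeBlocks : Prop := ∀ (tids : List Int), Dom_getTimeBlocks tids → Spec_getTimeBlocks tids (getTimeBlocks tids)

-- ===== LEMMAS AND PROOFS =====

-- canonical grouping both ports are proved equal to
def pvGroups : List Int → List (List Int)
  | [] => []
  | [x] => [[x]]
  | x :: y :: rest =>
      if y - x > 1 then [x] :: pvGroups (y :: rest)
      else
        match pvGroups (y :: rest) with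
        | [] => [[x]]          -- unreachable
        | g :: gs => (x :: g) :: gs

theorem pvGroups_ne_nil (x : Int) (l : List Int) : pvGroups (x :: l) ≠ [] := by
  cases l with
  | nil => simp [pvGroups]
  | cons y rest =>
      unfold pvGroups
      split
      · simp
      · cases h : pvGroups (y :: rest) <;> simp

theorem pvGetD_eq (ts : List Int) (k : Nat) (hk : k < ts.length) : ts.getD k 0 = ts[k] := by
  simp [List.getD, hk]

theorem pvDrop_cons (ts : List Int) (k : Nat) (hk : k < ts.length) :
    ts.drop k = ts.getD k 0 :: ts.drop (k + 1) := by
  rw [pvGetD_eq ts k hk, List.drop_eq_getElem_cons hk]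

theorem pvDropLast_getLastD (B : List (List Int)) (hB : B ≠ []) : B.dropLast ++ [B.getLastD []] = B := by
  cases B with
  | nil => exact absurd rfl hB
  | cons b bs =>
      rw [List.getLastD_eq_getLast?, List.getLast?_eq_some_getLast (by simp), Option.getD_some,
        List.dropLast_concat_getLast]

theorem pvTake_snoc (ts : List Int) (i j : Nat) (hij : i ≤ j) (hj : j < ts.length) :
    (ts.drop i).take (j + 1 - i) = (ts.drop i).take (j - i) ++ [ts.getD j 0] := by
  rw [show j + 1 - i = j - i + 1 by omega, List.take_add]
  congr 1
  rw [List.drop_drop, show i + (j - i) = j by omega, pvDrop_cons ts j hj]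
  simp

-- A's loop, expressed against pvGroups: current partial block is ts[i:j], rest starts at ts[j]
theorem goA_eq (ts : List Int) : ∀ (j i : Nat) (acc : List (List Int)), i ≤ j → j < ts.length →
    getTimeBlocksGoA ts i j acc =
      acc ++ (match pvGroups (ts.drop j) with
              | [] => []       -- unreachable since drop j ≠ []
              | g :: gs => (((ts.drop i).take (j - i)) ++ g) :: gs) := by
  intro j
  induction' hn : ts.length - j using Nat.strong_induction_on with n IH generalizing j
  intro i acc hij hj
  have hdrop : ts.drop j ≠ [] := by simp [List.drop_eq_nil_iff]; omega
  rw [getTimeBlocksGoA]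
  simp only [dif_pos hj]
  by_cases hlast : j = ts.length - 1
  · -- last element: drop j = [ts[j]]
    have hdl : ts.drop j = [ts.getD j 0] := by
      rw [pvDrop_cons ts j hj, List.drop_eq_nil_of_le (by omega)]
    rw [if_pos hlast, hdl]
    have hsl : PySem.List.slice ts (some (i : Int)) (some ((j : Int) + 1)) = (ts.drop i).take (j + 1 - i) := by
      have := PySem.List.slice_natCast (xs := ts) (a := i) (b := j + 1)
      simpa using this
    simp [pvGroups, hsl, pvTake_snoc ts i j hij hj]
  · have hj1 : j + 1 < ts.length := by omega
    rw [if_neg hlast]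
    have hdl : ts.drop j = ts.getD j 0 :: ts.drop (j + 1) := pvDrop_cons ts j hj
    by_cases hgap : (ts.getD (j+1) 0) - (ts.getD j 0) > 1
    · rw [if_pos hgap]
      rw [IH (ts.length - (j+1)) (by omega) (j+1) rfl (j+1) _ (le_refl _) hj1]
      have hsl : PySem.List.slice ts (some (i : Int)) (some ((j : Int) + 1)) = (ts.drop i).take (j + 1 - i) := by
        have := PySem.List.slice_natCast (xs := ts) (a := i) (b := j + 1)
        simpa using this
      -- pvGroups (drop j) splits: gap > 1 between ts[j] and ts[j+1]
      have hdl1 : ts.drop (j+1) = ts.getD (j+1) 0 :: ts.drop (j + 2) := pvDrop_cons ts (j+1) hj1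
      have hsplit : pvGroups (ts.drop j) = [ts.getD j 0] :: pvGroups (ts.drop (j+1)) := by
        rw [hdl, hdl1, pvGroups, if_pos (by omega), ← hdl1]
      rw [hsplit]
      cases hg : pvGroups (ts.drop (j+1)) with
      | nil => exact absurd (hdl1 ▸ hg) (pvGroups_ne_nil _ _)
      | cons g gs => simp [hsl, pvTake_snoc ts i j hij hj]
    · rw [if_neg hgap]
      rw [IH (ts.length - (j+1)) (by omega) (j+1) rfl i _ (by omega) hj1]
      have hdl1 : ts.drop (j+1) = ts.getD (j+1) 0 :: ts.drop (j + 2) := pvDrop_cons ts (j+1) hj1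
      have hsplit : match pvGroups (ts.drop (j+1)) with
          | [] => (pvGroups (ts.drop j) = [[ts.getD j 0]])
          | g :: gs => (pvGroups (ts.drop j) = (ts.getD j 0 :: g) :: gs) := by
        rw [hdl, hdl1, pvGroups, if_neg (by omega), ← hdl1]
        cases pvGroups (ts.drop (j+1)) <;> simp
      cases hg : pvGroups (ts.drop (j+1)) with
      | nil => exact absurd (hdl1 ▸ hg) (pvGroups_ne_nil _ _)
      | cons g gs =>
          rw [hg] at hsplit
          simp only [hsplit]
          simp [pvTake_snoc ts i j hij hj]

theorem portA_eq_groups (ts : List Int) : getTimeBlocksGoA ts 0 0 [] = pvGroups ts := by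
  cases ts with
  | nil => simp [getTimeBlocksGoA, pvGroups]
  | cons x l =>
      rw [goA_eq (x :: l) 0 0 [] (le_refl _) (by simp)]
      cases hg : pvGroups ((x :: l).drop 0) with
      | nil => exact absurd (by simpa using hg) (pvGroups_ne_nil x l)
      | cons g gs => simpa using hg.symm

-- B's fold against pvGroups: last block of the accumulator is the open block
theorem foldB_eq (rest : List Int) : ∀ (x : Int) (B : List (List Int)) (g : List Int) (gs : List (List Int)),
    B ≠ [] → pvGroups (x :: rest) = (x :: g) :: gs →
    ((x :: rest).zip rest).foldl getTimeBlocksStep B = B.dropLast ++ (B.getLastD [] ++ g) :: gs := by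
  induction rest with
  | nil =>
      intro x B g gs hB hg
      simp [pvGroups] at hg
      obtain ⟨hg1, hg2⟩ := hg
      subst hg1; subst hg2
      simpa using (pvDropLast_getLastD B hB).symm
  | cons y rs IH =>
      intro x B g gs hB hg
      have hzip : ((x :: y :: rs).zip (y :: rs)) = (x, y) :: ((y :: rs).zip rs) := by simp
      rw [hzip, List.foldl_cons]
      -- split pvGroups (y :: rs)
      cases hg2 : pvGroups (y :: rs) with
      | nil => exact absurd hg2 (pvGroups_ne_nil _ _)
      | cons g2 gs2 =>
        have hg2head : ∃ t2, g2 = y :: t2 := by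
          cases rs with
          | nil => simp [pvGroups] at hg2; exact ⟨[], by simp [hg2.1]⟩
          | cons z zs =>
              rw [pvGroups] at hg2
              split at hg2
              · exact ⟨[], by simp_all⟩
              · cases h3 : pvGroups (z :: zs) with
                | nil => exact absurd h3 (pvGroups_ne_nil _ _)
                | cons a as => rw [h3] at hg2; simp at hg2; exact ⟨_, hg2.1.symm⟩
        obtain ⟨t2, ht2⟩ := hg2head
        by_cases hgap : y - x ≤ 1
        · -- joined: pvGroups (x::y::rs) = (x :: g2) :: gs2, so g = g2, gs = gs2
          have : pvGroups (x :: y :: rs) = (x :: g2) :: gs2 := by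
            rw [pvGroups, if_neg (by omega), hg2]
          rw [this] at hg
          simp at hg
          obtain ⟨hgg, hgs⟩ := hg
          have hstep : getTimeBlocksStep B (x, y) = B.dropLast ++ [B.getLastD [] ++ [y]] := by
            simp [getTimeBlocksStep, hgap]
          rw [hstep, IH y _ t2 gs2 (by simp) (ht2 ▸ hg2)]
          simp [← hgg, ← hgs, ht2]
        · -- new block: pvGroups (x::y::rs) = [x] :: g2 :: gs2
          have : pvGroups (x :: y :: rs) = [x] :: g2 :: gs2 := by
            rw [pvGroups, if_pos (by omega), hg2]
          rw [this] at hg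
          simp at hg
          obtain ⟨hgg, hgs⟩ := hg
          have hstep : getTimeBlocksStep B (x, y) = B ++ [[y]] := by
            simp [getTimeBlocksStep, hgap]
          subst hgg; subst hgs; subst ht2
          rw [hstep, IH y _ t2 gs2 (by simp) hg2]
          have h1 : (B ++ [[y]]).dropLast = B := by simp
          have h2 : (B ++ [[y]]).getLastD [] = [y] := by simp
          rw [h1, h2]
          calc B ++ (([y] : List Int) ++ t2) :: gs2
              = (B.dropLast ++ [B.getLastD []]) ++ ((y :: t2) :: gs2) := by
                rw [pvDropLast_getLastD B hB]; simp
            _ = B.dropLast ++ (B.getLastD [] ++ ([] : List Int)) :: (y :: t2) :: gs2 := by simp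
theorem portB_eq_groups (ts : List Int) :
    (match ts with | [] => ([] : List (List Int)) | x :: rest => (ts.zip rest).foldl getTimeBlocksStep [[x]]) = pvGroups ts := by
  cases ts with
  | nil => simp [pvGroups]
  | cons x rest =>
      cases hg : pvGroups (x :: rest) with
      | nil => exact absurd hg (pvGroups_ne_nil _ _)
      | cons g gs =>
        have hghead : ∃ t, g = x :: t := by
          cases rest with
          | nil => simp [pvGroups] at hg; exact ⟨[], by simp [hg.1]⟩
          | cons z zs =>
              rw [pvGroups] at hg
              split at hg
              · exact ⟨[], by simp_all⟩
              · cases h3 : pvGroups (z :: zs) with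
                | nil => exact absurd h3 (pvGroups_ne_nil _ _)
                | cons a as => rw [h3] at hg; simp at hg; exact ⟨_, hg.1.symm⟩
        obtain ⟨t, ht⟩ := hghead
        show ((x :: rest).zip rest).foldl getTimeBlocksStep [[x]] = g :: gs
        rw [foldB_eq rest x [[x]] t gs (by simp) (ht ▸ hg)]
        simp [ht]

-- ===== VERDICT (by name: the statement is the Claim_ definition above) =====
theorem getTimeBlocks_spec : Claim_equal_getTimeBlocks := by
  intro tids _
  unfold Spec_getTimeBlocks getTimeBlocks getTimeBlocks_alt
  simp only []
  rw [portA_eq_groups, ← portB_eq_groups]
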